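-- pv_equiv track=rewrite | github.com/midatlanticAI/atlandemo | fast_logicbench_benchmark.py | are_contradictory_concepts
-- ===== SOURCE A (Python) =====
-- def are_contradictory_concepts(option_a: str, option_b: str):
--     """Check if two options represent contradictory concepts"""
--     option_a_lower = option_a.lower()
--     option_b_lower = option_b.lower()
--
--     # Common contradictory pairs
--     contradictory_pairs = [
--         (['healthy', 'healthier', 'fit', 'stronger'], ['unhealthy', 'sick', 'weak', 'disease']),
--         (['early', 'on time', 'punctual'], ['late', 'delay']),
--         (['inside', 'indoors'], ['outside', 'outdoors']),
--         (['safe', 'safely'], ['dangerous', 'unsafe']),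
--         (['clean', 'healthy'], ['pollute', 'dirty']),
--         (['fresh', 'energetic'], ['tired', 'exhausted', 'sluggish']),
--         (['hydrated'], ['dehydrated', 'thirsty']),
--         (['calm', 'relaxed'], ['stress', 'anxious']),
--     ]
--
--     for positive_words, negative_words in contradictory_pairs:
--         a_has_positive = any(word in option_a_lower for word in positive_words)
--         a_has_negative = any(word in option_a_lower for word in negative_words)
--         b_has_positive = any(word in option_b_lower for word in positive_words)
--         b_has_negative = any(word in option_b_lower for word in negative_words)
--
--         # If one option has positive and the other has negative from same domain
--         if (a_has_positive and b_has_negative) or (a_has_negative and b_has_positive):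
--             return True
--
--     return False
-- ===== SOURCE B (Python) =====
-- def are_contradictory_concepts(option_a: str, option_b: str):
--     """Check if two options represent contradictory concepts"""
--     contradictory_pairs = [
--         (['healthy', 'healthier', 'fit', 'stronger'], ['unhealthy', 'sick', 'weak', 'disease']),
--         (['early', 'on time', 'punctual'], ['late', 'delay']),
--         (['inside', 'indoors'], ['outside', 'outdoors']),
--         (['safe', 'safely'], ['dangerous', 'unsafe']),
--         (['clean', 'healthy'], ['pollute', 'dirty']),
--         (['fresh', 'energetic'], ['tired', 'exhausted', 'sluggish']),
--         (['hydrated'], ['dehydrated', 'thirsty']),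
--         (['calm', 'relaxed'], ['stress', 'anxious']),
--     ]
--
--     # Flatten the pair table into one word table with a SIGNED domain code:
--     # +(i+1) for a positive word of pair i, -(i+1) for a negative word.
--     word_codes = []
--     for i, (pos_words, neg_words) in enumerate(contradictory_pairs):
--         word_codes += [(w, i + 1) for w in pos_words]
--         word_codes += [(w, -(i + 1)) for w in neg_words]
--
--     def hits(text):
--         t = text.lower()
--         return {c for w, c in word_codes if w in t}
--
--     hits_a = hits(option_a)
--     hits_b = hits(option_b)
--     # Contradictory iff the two options hit opposite codes of the same domain.
--     return any(-c in hits_b for c in hits_a)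
-- ===== Notes on version B (the rewrite author's own statement) =====
-- stated objective: alternative
-- what changed: Replaces A's per-pair loop (four any-tests and an early return per pair) by a flattened word table with signed domain codes (+(i+1)/-(i+1)): each option is reduced once to a set of hit codes and the answer is whether the hit sets contain opposite codes (any(-c in hits_b for c in hits_a)).
import Mathlib
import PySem

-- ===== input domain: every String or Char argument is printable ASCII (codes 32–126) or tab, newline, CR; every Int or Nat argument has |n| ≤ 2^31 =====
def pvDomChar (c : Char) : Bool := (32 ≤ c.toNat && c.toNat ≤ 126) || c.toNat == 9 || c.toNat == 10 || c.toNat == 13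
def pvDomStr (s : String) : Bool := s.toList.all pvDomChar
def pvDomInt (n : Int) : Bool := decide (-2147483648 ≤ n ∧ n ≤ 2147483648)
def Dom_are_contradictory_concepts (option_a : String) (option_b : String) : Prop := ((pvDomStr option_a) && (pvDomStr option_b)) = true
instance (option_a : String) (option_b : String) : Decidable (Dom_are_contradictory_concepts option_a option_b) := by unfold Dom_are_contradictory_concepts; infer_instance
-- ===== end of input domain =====

-- B replaces A's per-pair loop (four any-tests and an early return per pair) by a flat
-- word table with SIGNED domain codes (+(i+1) positive / -(i+1) negative of pair i):
-- each option is reduced once to its set of hit codes, and the answer is whether the two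
-- hit sets contain opposite codes; same substring semantics ("alternative", not faster).

-- the fixed table of contradictory word pairs (identical literal in both Pythons)
def pvPairs : List (List String × List String) := [
  (["healthy", "healthier", "fit", "stronger"], ["unhealthy", "sick", "weak", "disease"]),
  (["early", "on time", "punctual"], ["late", "delay"]),
  (["inside", "indoors"], ["outside", "outdoors"]),
  (["safe", "safely"], ["dangerous", "unsafe"]),
  (["clean", "healthy"], ["pollute", "dirty"]),
  (["fresh", "energetic"], ["tired", "exhausted", "sluggish"]),
  (["hydrated"], ["dehydrated", "thirsty"]),
  (["calm", "relaxed"], ["stress", "anxious"])]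

-- ===== PORT A =====
-- the for-loop over contradictory_pairs with early `return True`
def pvLoopA (al bl : String) : List (List String × List String) → Bool
  | [] => false
  | (pws, nws) :: rest =>
    let aP := pws.any (fun w => PySem.Str.isIn w al)
    let aN := nws.any (fun w => PySem.Str.isIn w al)
    let bP := pws.any (fun w => PySem.Str.isIn w bl)
    let bN := nws.any (fun w => PySem.Str.isIn w bl)
    if (aP && bN) || (aN && bP) then true else pvLoopA al bl rest

def are_contradictory_concepts (option_a : String) (option_b : String) : Bool :=
  pvLoopA (PySem.Str.lower option_a) (PySem.Str.lower option_b) pvPairs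

-- ===== PORT B =====
-- the word_codes loop: 'word_codes += [(w, i+1) for w in pos] + [(w, -(i+1)) for w in neg]'
def pvCodes : List (String × Int) :=
  (PySem.List.enumerate pvPairs).foldl
    (fun acc e =>
      acc ++ (e.2.1.map (fun w => (w, e.1 + 1)) ++ e.2.2.map (fun w => (w, -(e.1 + 1))))) []

-- hits(text): the set comprehension {c for w, c in word_codes if w in t}
def pvHits (text : String) : PySem.Set Int :=
  let t := PySem.Str.lower text
  PySem.Set.ofList ((pvCodes.filter (fun wc => PySem.Str.isIn wc.1 t)).map (·.2))

def are_contradictory_concepts_alt (option_a : String) (option_b : String) : Bool :=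
  let hits_a := pvHits option_a
  let hits_b := pvHits option_b
  -- any(-c in hits_b for c in hits_a): order-independent consumption of the set
  hits_a.any (fun c => PySem.Set.contains hits_b (-c))

-- ===== PRECONDITION & SPEC =====
def Spec_are_contradictory_concepts (option_a : String) (option_b : String) (out : Bool) : Prop := out = are_contradictory_concepts_alt option_a option_b
instance (option_a : String) (option_b : String) (out : Bool) : Decidable (Spec_are_contradictory_concepts option_a option_b out) := by unfold Spec_are_contradictory_concepts; infer_instance

-- ===== CLAIM (what is proved, stated in full; the proofs are below) =====
def Claim_equal_are_contradictory_concepts : Prop := ∀ (option_a : String) (option_b : String), Dom_are_contradictory_concepts option_a option_b → Spec_are_contradictory_concepts option_a option_b (are_contradictory_concepts option_a option_b)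

-- ===== LEMMAS AND PROOFS =====

-- the per-pair test A's loop performs
def pvCond (al bl : String) (p : List String × List String) : Bool :=
  (p.1.any (fun w => PySem.Str.isIn w al) && p.2.any (fun w => PySem.Str.isIn w bl)) ||
  (p.2.any (fun w => PySem.Str.isIn w al) && p.1.any (fun w => PySem.Str.isIn w bl))

theorem pvLoopA_eq_any (al bl : String) (L : List (List String × List String)) :
    pvLoopA al bl L = L.any (pvCond al bl) := by
  induction L with
  | nil => rfl
  | cons p rest ih =>
    obtain ⟨pws, nws⟩ := p
    simp only [pvLoopA, ih, List.any_cons]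
    split_ifs with h
    · rw [show pvCond al bl (pws, nws) = true from h, Bool.true_or]
    · rw [show pvCond al bl (pws, nws) = false from Bool.eq_false_iff.mpr h, Bool.false_or]

theorem pv_a_iff (a b : String) :
    are_contradictory_concepts a b = true ↔
      ∃ (k : Nat) (h : k < pvPairs.length),
        pvCond (PySem.Str.lower a) (PySem.Str.lower b) pvPairs[k] = true := by
  rw [are_contradictory_concepts, pvLoopA_eq_any, List.any_eq_true]
  constructor
  · rintro ⟨p, hp, hc⟩
    obtain ⟨k, hk, hpe⟩ := List.mem_iff_getElem.mp hp
    exact ⟨k, hk, hpe ▸ hc⟩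
  · rintro ⟨k, hk, hc⟩
    exact ⟨pvPairs[k], List.getElem_mem hk, hc⟩

-- decoding the signed code table
theorem pv_mem_codes (w : String) (c : Int) :
    (w, c) ∈ pvCodes ↔
      ∃ (k : Nat) (h : k < pvPairs.length),
        (c = (k : Int) + 1 ∧ w ∈ pvPairs[k].1) ∨ (c = -((k : Int) + 1) ∧ w ∈ pvPairs[k].2) := by
  rw [pvCodes, PySem.List.foldl_append_eq_flatMap, List.nil_append, List.mem_flatMap]
  constructor
  · rintro ⟨e, he, hm⟩
    obtain ⟨k, hk, rfl⟩ := (PySem.List.mem_enumerate_iff _ _ _).mp he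
    rcases List.mem_append.mp hm with hm | hm <;>
      obtain ⟨w', hw', he'⟩ := List.mem_map.mp hm <;>
      obtain ⟨rfl, rfl⟩ := Prod.mk.injEq .. ▸ he' <;>
      exact ⟨k, hk, by simp_all⟩
  · rintro ⟨k, hk, hc | hc⟩
    · exact ⟨((k : Int), pvPairs[k]), (PySem.List.mem_enumerate_iff _ _ _).mpr ⟨k, hk, by simp⟩,
        List.mem_append.mpr (Or.inl (List.mem_map.mpr ⟨w, hc.2, by simp [hc.1]⟩))⟩
    · exact ⟨((k : Int), pvPairs[k]), (PySem.List.mem_enumerate_iff _ _ _).mpr ⟨k, hk, by simp⟩,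
        List.mem_append.mpr (Or.inr (List.mem_map.mpr ⟨w, hc.2, by simp [hc.1]⟩))⟩

theorem pv_mem_hits (t : String) (c : Int) :
    c ∈ pvHits t ↔
      ∃ (k : Nat) (h : k < pvPairs.length),
        (c = (k : Int) + 1 ∧ pvPairs[k].1.any (fun w => PySem.Str.isIn w (PySem.Str.lower t))) ∨
        (c = -((k : Int) + 1) ∧ pvPairs[k].2.any (fun w => PySem.Str.isIn w (PySem.Str.lower t))) := by
  rw [pvHits, PySem.Set.mem_ofList]
  constructor
  · intro hm
    obtain ⟨wc, hwc, rfl⟩ := List.mem_map.mp hm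
    obtain ⟨hmem, hin⟩ := List.mem_filter.mp hwc
    obtain ⟨w, c⟩ := wc
    obtain ⟨k, hk, hd⟩ := (pv_mem_codes w c).mp hmem
    rcases hd with ⟨rfl, hw⟩ | ⟨rfl, hw⟩
    · exact ⟨k, hk, Or.inl ⟨rfl, List.any_eq_true.mpr ⟨w, hw, by simpa using hin⟩⟩⟩
    · exact ⟨k, hk, Or.inr ⟨rfl, List.any_eq_true.mpr ⟨w, hw, by simpa using hin⟩⟩⟩
  · rintro ⟨k, hk, ⟨rfl, hany⟩ | ⟨rfl, hany⟩⟩ <;>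
      obtain ⟨w, hw, hin⟩ := List.any_eq_true.mp hany
    · exact List.mem_map.mpr ⟨(w, (k : Int) + 1),
        List.mem_filter.mpr ⟨(pv_mem_codes w _).mpr ⟨k, hk, Or.inl ⟨rfl, hw⟩⟩, by simpa using hin⟩, rfl⟩
    · exact List.mem_map.mpr ⟨(w, -((k : Int) + 1)),
        List.mem_filter.mpr ⟨(pv_mem_codes w _).mpr ⟨k, hk, Or.inr ⟨rfl, hw⟩⟩, by simpa using hin⟩, rfl⟩

theorem pv_alt_iff (a b : String) :
    are_contradictory_concepts_alt a b = true ↔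
      ∃ (k : Nat) (h : k < pvPairs.length),
        pvCond (PySem.Str.lower a) (PySem.Str.lower b) pvPairs[k] = true := by
  simp only [are_contradictory_concepts_alt, List.any_eq_true, PySem.Set.contains_iff]
  constructor
  · rintro ⟨c, hca, hcb⟩
    obtain ⟨k, hk, hda⟩ := (pv_mem_hits a c).mp hca
    obtain ⟨k', hk', hdb⟩ := (pv_mem_hits b (-c)).mp hcb
    rcases hda with ⟨rfl, ha⟩ | ⟨rfl, ha⟩ <;> rcases hdb with ⟨hc', hb⟩ | ⟨hc', hb⟩
    · exact absurd hc' (by omega)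
    · obtain rfl : k' = k := by omega
      exact ⟨k', hk', Bool.or_eq_true_iff.mpr (Or.inl (Bool.and_eq_true_iff.mpr ⟨ha, hb⟩))⟩
    · obtain rfl : k' = k := by omega
      exact ⟨k', hk', Bool.or_eq_true_iff.mpr (Or.inr (Bool.and_eq_true_iff.mpr ⟨ha, hb⟩))⟩
    · exact absurd hc' (by omega)
  · rintro ⟨k, hk, hc⟩
    rcases Bool.or_eq_true_iff.mp hc with hc | hc <;> obtain ⟨h1, h2⟩ := Bool.and_eq_true_iff.mp hc
    · exact ⟨(k : Int) + 1, (pv_mem_hits a _).mpr ⟨k, hk, Or.inl ⟨rfl, h1⟩⟩,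
        (pv_mem_hits b _).mpr ⟨k, hk, Or.inr ⟨by ring, h2⟩⟩⟩
    · exact ⟨-((k : Int) + 1), (pv_mem_hits a _).mpr ⟨k, hk, Or.inr ⟨rfl, h1⟩⟩,
        (pv_mem_hits b _).mpr ⟨k, hk, Or.inl ⟨by ring, h2⟩⟩⟩

-- ===== VERDICT (by name: the statement is the Claim_ definition above) =====
theorem are_contradictory_concepts_spec : Claim_equal_are_contradictory_concepts := by
  intro a b _
  show are_contradictory_concepts a b = are_contradictory_concepts_alt a b
  rw [Bool.eq_iff_iff, pv_a_iff, pv_alt_iff]
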